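-- pv_equiv track=rewrite | github.com/LenaAbel/OPTIMISATION_PROJECT | main2.py | find_elementary_configurations_bruteforce
-- ===== SOURCE A (Python) =====
-- from itertools import combinations
--
-- def find_elementary_configurations_bruteforce(zones, sensors):
--     # Initialiser une liste vide pour stocker les configurations élémentaires trouvées
--     elementary_configs = []
--
--     all_sensors = list(sensors.keys())
--
--     # Parcourir toutes les tailles possibles de combinaisons de capteurs, de 1 à N (le nombre total de capteurs)
--     for r in range(1, len(all_sensors) + 1):
--         # Générer toutes les combinaisons possibles de r capteurs parmi tous les capteurs
--         for comb in combinations(all_sensors, r):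
--             # Vérifier si la combinaison actuelle est une configuration élémentaire
--             if is_elementary_configuration(zones, sensors, list(comb)):
--                 # Si c'est une configuration élémentaire, l'ajouter à la liste des configurations élémentaires
--                 elementary_configs.append(list(comb))
--
--     # Retourner la liste de toutes les configurations élémentaires trouvées
--     return elementary_configs
--
-- def is_elementary_configuration(zones, sensors, config):
--     # stocker les zones couvertes par la configuration actuelle
--     covered_zones = set()
--
--     # Parcourir chaque capteur de la configuration
--     for sensor in config:
--         # Ajouter les zones couvertes par ce capteur à l'ensemble des zones couvertes
--         covered_zones.update(sensors[sensor])
--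
--     # Vérifier si toutes les zones sont couvertes par la configuration
--     # Si l'ensemble des zones couvertes n'est pas égal à l'ensemble des zones à couvrir, retourner False
--     if set(zones) != covered_zones:
--         return False
--
--     # Vérifier si la configuration est élémentaire
--     # Parcourir chaque capteur de la configuration
--     for sensor in config:
--         # Créer une copie de la configuration actuelle
--         temp_config = config.copy()
--         # Retirer un capteur de la configuration temporaire
--         temp_config.remove(sensor)
--
--         # Initialiser un ensemble vide pour stocker les zones couvertes par la configuration temporaire
--         temp_covered_zones = set()
--         # Parcourir chaque capteur de la configuration temporaire
--         for s in temp_config: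
--             # Ajouter les zones couvertes par ce capteur à l'ensemble des zones couvertes temporairement
--             temp_covered_zones.update(sensors[s])
--
--         # Vérifier si la configuration temporaire couvre toujours toutes les zones
--         if set(zones) == temp_covered_zones:
--             return False  # Si c'est le cas, retourner False car cela signifie que le capteur retiré n'était pas indispensable
--     # Si toutes les vérifications sont passées, retourner True, indiquant que la configuration est élémentaire
--     return True
-- ===== SOURCE B (Python) =====
-- from itertools import combinations
--
-- def find_elementary_configurations_bruteforce(zones, sensors):
--     zone_set = set(zones)
--     names = list(sensors.keys())
--     cover = {s: set(sensors[s]) for s in names}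
--
--     def elementary(comb):
--         covered = set()
--         for s in comb:
--             covered |= cover[s]
--         if covered != zone_set:
--             return False
--         # one counting pass: a sensor is indispensable iff it covers a zone counted exactly once
--         counts = {}
--         for s in comb:
--             for z in cover[s]:
--                 counts[z] = counts.get(z, 0) + 1
--         return all(any(counts[z] == 1 for z in cover[s]) for s in comb)
--
--     return [list(comb)
--             for r in range(1, len(names) + 1)
--             for comb in combinations(names, r)
--             if elementary(comb)]
-- ===== Notes on version B (the rewrite author's own statement) =====
-- stated objective: alternative
-- what changed: Minimality is no longer tested by re-unioning the coverage of every (r-1)-subset (O(r^2*z) per combination); B makes one coverage-count pass per combination and declares a sensor indispensable iff it covers a zone counted exactly once (O(r*z) per combination).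
import Mathlib
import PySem

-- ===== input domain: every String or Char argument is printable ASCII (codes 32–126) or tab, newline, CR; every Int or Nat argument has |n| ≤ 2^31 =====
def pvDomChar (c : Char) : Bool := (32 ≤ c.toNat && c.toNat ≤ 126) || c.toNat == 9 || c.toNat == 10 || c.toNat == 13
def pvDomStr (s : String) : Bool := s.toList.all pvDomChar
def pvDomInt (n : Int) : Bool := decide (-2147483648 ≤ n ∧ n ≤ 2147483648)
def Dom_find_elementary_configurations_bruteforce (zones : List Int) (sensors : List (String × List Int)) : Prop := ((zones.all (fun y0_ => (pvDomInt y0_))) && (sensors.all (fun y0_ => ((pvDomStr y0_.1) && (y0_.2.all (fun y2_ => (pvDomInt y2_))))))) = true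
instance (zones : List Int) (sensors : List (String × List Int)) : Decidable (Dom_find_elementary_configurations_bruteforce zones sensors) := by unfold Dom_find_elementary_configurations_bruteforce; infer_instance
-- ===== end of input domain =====

-- B replaces A's per-sensor removal re-union minimality test by one zone coverage-count pass
-- per combination: a sensor is indispensable iff it covers a zone counted exactly once (objective: alternative).

-- ===== PORT A =====
-- sensors[s] is ported as (d.getD s []): every key looked up comes from d.keys, so the default is never used.
def pvIsElemA (zones : List Int) (d : PySem.Dict String (List Int)) (config : List String) : Bool :=
  let covered := config.foldl (fun cov sensor => PySem.Set.update cov (d.getD sensor [])) PySem.Set.empty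
  if !(PySem.Set.equal (PySem.Set.ofList zones) covered) then false
  else if config.any (fun sensor =>
      let temp_config := config.erase sensor
      let temp_covered := temp_config.foldl (fun cov s => PySem.Set.update cov (d.getD s [])) PySem.Set.empty
      PySem.Set.equal (PySem.Set.ofList zones) temp_covered) then false
  else true

def find_elementary_configurations_bruteforce (zones : List Int) (sensors : List (String × List Int)) : List (List String) :=
  let d := PySem.Dict.ofList sensors
  let all_sensors := d.keys
  (List.range all_sensors.length).foldl (fun acc i =>
    (PySem.List.combinations all_sensors (i + 1)).foldl (fun acc comb =>
      if pvIsElemA zones d comb then acc ++ [comb] else acc) acc) []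

-- ===== PORT B =====
def pvCounts (cover : PySem.Dict String (PySem.Set Int)) (comb : List String) : PySem.Dict Int Int :=
  comb.foldl (fun cnt s => (cover.getD s []).foldl (fun cnt z => cnt.modify z 0 (· + 1)) cnt) PySem.Dict.empty

def pvElementaryB (zoneSet : PySem.Set Int) (cover : PySem.Dict String (PySem.Set Int)) (comb : List String) : Bool :=
  let covered := comb.foldl (fun cov s => PySem.Set.union cov (cover.getD s [])) PySem.Set.empty
  if !(PySem.Set.equal covered zoneSet) then false
  else
    let counts := pvCounts cover comb
    comb.all (fun s => (cover.getD s []).any (fun z => counts.getD z 0 == 1))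

def find_elementary_configurations_bruteforce_alt (zones : List Int) (sensors : List (String × List Int)) : List (List String) :=
  let zoneSet := PySem.Set.ofList zones
  let d := PySem.Dict.ofList sensors
  let names := d.keys
  let cover := names.foldl (fun c s => c.insert s (PySem.Set.ofList (d.getD s []))) PySem.Dict.empty
  (List.range names.length).flatMap (fun r =>
    (PySem.List.combinations names (r + 1)).filter (fun comb => pvElementaryB zoneSet cover comb))

-- ===== PRECONDITION & SPEC =====
def Spec_find_elementary_configurations_bruteforce (zones : List Int) (sensors : List (String × List Int)) (out : List (List String)) : Prop := out = find_elementary_configurations_bruteforce_alt zones sensors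
instance (zones : List Int) (sensors : List (String × List Int)) (out : List (List String)) : Decidable (Spec_find_elementary_configurations_bruteforce zones sensors out) := by unfold Spec_find_elementary_configurations_bruteforce; infer_instance

-- ===== CLAIM (what is proved, stated in full; the proofs are below) =====
def Claim_equal_find_elementary_configurations_bruteforce : Prop := ∀ (zones : List Int) (sensors : List (String × List Int)), Dom_find_elementary_configurations_bruteforce zones sensors → Spec_find_elementary_configurations_bruteforce zones sensors (find_elementary_configurations_bruteforce zones sensors)

-- ===== LEMMAS AND PROOFS =====

-- membership in A's covered-zones fold
lemma pv_mem_foldl_update {α β : Type} [BEq α] [LawfulBEq α] (f : β → List α) (l : List β)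
    (init : PySem.Set α) (y : α) :
    y ∈ l.foldl (fun s b => PySem.Set.update s (f b)) init ↔ y ∈ init ∨ ∃ b ∈ l, y ∈ f b := by
  induction l generalizing init with
  | nil => simp
  | cons a l ih =>
    simp [ih, PySem.Set.mem_update]
    tauto

-- membership in B's covered-zones fold
lemma pv_mem_foldl_union {α β : Type} [BEq α] [LawfulBEq α] (f : β → PySem.Set α) (l : List β)
    (init : PySem.Set α) (y : α) :
    y ∈ l.foldl (fun s b => PySem.Set.union s (f b)) init ↔ y ∈ init ∨ ∃ b ∈ l, y ∈ f b := by
  induction l generalizing init with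
  | nil => simp
  | cons a l ih =>
    simp [ih, PySem.Set.mem_union]
    tauto

-- the value of B's counter: per-zone coverage count over the combination
lemma pv_getD_counts_aux (d : PySem.Dict String (List Int)) (cover : PySem.Dict String (PySem.Set Int))
    (comb : List String) (hsub : ∀ s ∈ comb, cover.getD s [] = PySem.Set.ofList (d.getD s []))
    (cnt : PySem.Dict Int Int) (z : Int) :
    (comb.foldl (fun cnt s => (cover.getD s []).foldl (fun cnt z => cnt.modify z 0 (· + 1)) cnt) cnt).getD z 0
      = cnt.getD z 0 + (comb.countP (fun t => decide (z ∈ d.getD t [])) : Int) := by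
  induction comb generalizing cnt with
  | nil => simp
  | cons a l ih =>
    have ha := hsub a (by simp)
    have hcount : (cover.getD a []).count z = if z ∈ d.getD a [] then 1 else 0 := by
      rw [ha]
      by_cases hz : z ∈ d.getD a []
      · rw [if_pos hz]
        have h1 : 0 < (PySem.Set.ofList (d.getD a [])).count z := by
          rw [List.count_pos_iff, PySem.Set.mem_ofList]; exact hz
        have h2 : (PySem.Set.ofList (d.getD a [])).count z ≤ 1 :=
          List.nodup_iff_count_le_one.mp (PySem.Set.nodup_ofList _) z
        omega
      · rw [if_neg hz]
        simp [List.count_eq_zero, PySem.Set.mem_ofList, hz]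
    simp only [List.foldl_cons, List.countP_cons]
    rw [ih (fun s hs => hsub s (by simp [hs])), PySem.Dict.getD_foldl_modify_add_one, hcount]
    by_cases hz : z ∈ d.getD a []
    · simp [hz]
      ring
    · simp [hz]

lemma pv_getD_counts (d : PySem.Dict String (List Int)) (cover : PySem.Dict String (PySem.Set Int))
    (comb : List String) (hsub : ∀ s ∈ comb, cover.getD s [] = PySem.Set.ofList (d.getD s [])) (z : Int) :
    (pvCounts cover comb).getD z 0 = (comb.countP (fun t => decide (z ∈ d.getD t [])) : Int) := by
  unfold pvCounts
  rw [pv_getD_counts_aux d cover comb hsub PySem.Dict.empty z]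
  simp

-- lookup in B's precomputed cover dict
lemma pv_cover_getD (d : PySem.Dict String (List Int)) {s : String} (hs : s ∈ d.keys) (hnd : d.keys.Nodup) :
    (d.keys.foldl (fun c t => c.insert t (PySem.Set.ofList (d.getD t []))) PySem.Dict.empty).getD s []
      = PySem.Set.ofList (d.getD s []) := by
  have hitems := PySem.Dict.items_foldl_insert_fresh d.keys (fun t => t)
      (fun t => PySem.Set.ofList (d.getD t [])) PySem.Dict.empty
      (fun a _ => PySem.Dict.contains_empty a) (by simpa using hnd)
  apply PySem.Dict.getD_of_mem_items
  · rw [hitems]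
    simp only [List.mem_append, List.mem_map]
    exact Or.inr ⟨s, hs, rfl⟩
  · exact PySem.Dict.nodup_keys_foldl_insert d.keys _ PySem.Dict.empty PySem.Dict.nodup_keys_empty

-- A's "removing sensor s still covers everything" ↔ ¬ "s covers a zone counted exactly once"
lemma pv_removable_iff (zones : List Int) (d : PySem.Dict String (List Int)) (comb : List String)
    (hnd : comb.Nodup) {s : String} (hs : s ∈ comb)
    (H : ∀ x : Int, x ∈ zones ↔ ∃ t ∈ comb, x ∈ d.getD t []) :
    (PySem.Set.equal (PySem.Set.ofList zones)
        ((comb.erase s).foldl (fun cov t => PySem.Set.update cov (d.getD t [])) PySem.Set.empty) = true)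
      ↔ ¬ ∃ z ∈ d.getD s [], comb.countP (fun t => decide (z ∈ d.getD t [])) = 1 := by
  have hperm : comb.Perm (s :: comb.erase s) := List.perm_cons_erase hs
  rw [PySem.Set.equal_iff]
  constructor
  · rintro heq ⟨z, hz, h1⟩
    have hzz : z ∈ zones := (H z).mpr ⟨s, hs, hz⟩
    have hmem : z ∈ (comb.erase s).foldl (fun cov t => PySem.Set.update cov (d.getD t [])) PySem.Set.empty :=
      (heq z).mp (by simpa [PySem.Set.mem_ofList] using hzz)
    rw [pv_mem_foldl_update] at hmem
    rcases hmem with h | ⟨t, ht, hzt⟩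
    · simp [PySem.Set.empty] at h
    · have hpos : 0 < (comb.erase s).countP (fun t => decide (z ∈ d.getD t [])) :=
        List.countP_pos_iff.mpr ⟨t, ht, by simpa using hzt⟩
      have hp := hperm.countP_eq (fun t => decide (z ∈ d.getD t []))
      rw [List.countP_cons] at hp
      simp [hz] at hp
      omega
  · intro hn x
    rw [PySem.Set.mem_ofList, pv_mem_foldl_update]
    constructor
    · intro hx
      by_cases he : ∃ t ∈ comb.erase s, x ∈ d.getD t []
      · exact Or.inr he
      · exfalso
        obtain ⟨t, ht, hxt⟩ := (H x).mp hx
        have hts : t = s := by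
          by_contra hne
          exact he ⟨t, (hnd.mem_erase_iff).mpr ⟨hne, ht⟩, hxt⟩
        subst hts
        have hz0 : (comb.erase t).countP (fun u => decide (x ∈ d.getD u [])) = 0 :=
          List.countP_eq_zero.mpr (fun u hu => by simpa using fun hxu => he ⟨u, hu, hxu⟩)
        have hp := hperm.countP_eq (fun u => decide (x ∈ d.getD u []))
        rw [List.countP_cons] at hp
        simp [hxt] at hp
        exact hn ⟨x, hxt, by omega⟩
    · rintro (h | ⟨t, ht, hxt⟩)
      · simp [PySem.Set.empty] at h
      · exact (H x).mpr ⟨t, List.erase_subset ht, hxt⟩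

-- the two per-combination predicates agree on nodup combinations
lemma pv_pred_eq (zones : List Int) (d : PySem.Dict String (List Int))
    (cover : PySem.Dict String (PySem.Set Int)) (comb : List String) (hnd : comb.Nodup)
    (hsub : ∀ s ∈ comb, cover.getD s [] = PySem.Set.ofList (d.getD s [])) :
    pvIsElemA zones d comb = pvElementaryB (PySem.Set.ofList zones) cover comb := by
  unfold pvIsElemA pvElementaryB
  simp only []
  have hcmB : ∀ x : Int,
      x ∈ comb.foldl (fun cov s => PySem.Set.union cov (cover.getD s [])) PySem.Set.empty
        ↔ ∃ s ∈ comb, x ∈ d.getD s [] := by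
    intro x
    rw [pv_mem_foldl_union]
    constructor
    · rintro (h | ⟨s, hsm, hzs⟩)
      · simp [PySem.Set.empty] at h
      · exact ⟨s, hsm, by rwa [hsub s hsm, PySem.Set.mem_ofList] at hzs⟩
    · rintro ⟨s, hsm, hzs⟩
      exact Or.inr ⟨s, hsm, by rw [hsub s hsm, PySem.Set.mem_ofList]; exact hzs⟩
  have hcm : ∀ x : Int,
      x ∈ comb.foldl (fun cov sensor => PySem.Set.update cov (d.getD sensor [])) PySem.Set.empty
        ↔ ∃ s ∈ comb, x ∈ d.getD s [] := by
    intro x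
    rw [pv_mem_foldl_update]
    simp [PySem.Set.empty]
  have hEq : PySem.Set.equal (PySem.Set.ofList zones)
        (comb.foldl (fun cov sensor => PySem.Set.update cov (d.getD sensor [])) PySem.Set.empty)
      = PySem.Set.equal
        (comb.foldl (fun cov s => PySem.Set.union cov (cover.getD s [])) PySem.Set.empty)
        (PySem.Set.ofList zones) := by
    rw [Bool.eq_iff_iff, PySem.Set.equal_iff, PySem.Set.equal_iff]
    constructor <;> intro h x <;> have hx := h x <;>
      simp only [PySem.Set.mem_ofList, hcmB, hcm] at hx ⊢ <;> exact hx.symm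
  rw [← hEq]
  by_cases hcov : PySem.Set.equal (PySem.Set.ofList zones)
      (comb.foldl (fun cov sensor => PySem.Set.update cov (d.getD sensor [])) PySem.Set.empty) = true
  · have H : ∀ x : Int, x ∈ zones ↔ ∃ t ∈ comb, x ∈ d.getD t [] := by
      intro x
      have hx := (PySem.Set.equal_iff _ _).mp hcov x
      rw [pv_mem_foldl_update, PySem.Set.mem_ofList] at hx
      constructor
      · intro h
        rcases hx.mp h with h' | h'
        · simp [PySem.Set.empty] at h'
        · exact h'
      · intro h; exact hx.mpr (Or.inr h)
    rw [hcov]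
    simp only [Bool.not_true, Bool.false_eq_true, if_false]
    have hpoint : ∀ s ∈ comb,
        ((PySem.Set.equal (PySem.Set.ofList zones)
            ((comb.erase s).foldl (fun cov t => PySem.Set.update cov (d.getD t [])) PySem.Set.empty)) = true
          ↔ ¬ ((cover.getD s []).any (fun z => (pvCounts cover comb).getD z 0 == 1) = true)) := by
      intro s hs
      rw [pv_removable_iff zones d comb hnd hs H]
      apply not_congr
      rw [List.any_eq_true]
      constructor <;> rintro ⟨z, hz, h1⟩ <;> refine ⟨z, ?_, ?_⟩
      · rw [hsub s hs, PySem.Set.mem_ofList]; exact hz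
      · rw [pv_getD_counts d cover comb hsub z]
        simpa using h1
      · rwa [hsub s hs, PySem.Set.mem_ofList] at hz
      · rw [pv_getD_counts d cover comb hsub z] at h1
        simpa using h1
    have hAny : (comb.any (fun sensor =>
        PySem.Set.equal (PySem.Set.ofList zones)
          ((comb.erase sensor).foldl (fun cov s => PySem.Set.update cov (d.getD s [])) PySem.Set.empty)))
        = !(comb.all (fun s => (cover.getD s []).any (fun z => (pvCounts cover comb).getD z 0 == 1))) := by
      rw [Bool.eq_iff_iff, Bool.not_eq_true', List.all_eq_false, List.any_eq_true]
      constructor <;> rintro ⟨s, hs, h1⟩ <;> exact ⟨s, hs, by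
        first
          | exact (hpoint s hs).mp h1
          | exact (hpoint s hs).mpr h1⟩
    rw [hAny]
    cases comb.all (fun s => (cover.getD s []).any (fun z => (pvCounts cover comb).getD z 0 == 1)) <;> simp
  · rw [Bool.not_eq_true] at hcov
    rw [hcov]
    simp

-- combinations of a nodup list are nodup lists of its elements
lemma pv_comb_facts {α : Type} {xs comb : List α} {r : Nat}
    (h : comb ∈ PySem.List.combinations xs r) (hnd : xs.Nodup) :
    comb.Nodup ∧ ∀ s ∈ comb, s ∈ xs := by
  have hsl := PySem.List.sublist_of_mem_combinations h
  exact ⟨hsl.nodup hnd, fun s hs => hsl.subset hs⟩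

-- ===== VERDICT (by name: the statement is the Claim_ definition above) =====
theorem find_elementary_configurations_bruteforce_spec : Claim_equal_find_elementary_configurations_bruteforce := by
  intro zones sensors _
  unfold Spec_find_elementary_configurations_bruteforce
  unfold find_elementary_configurations_bruteforce find_elementary_configurations_bruteforce_alt
  set d := PySem.Dict.ofList sensors with hd
  have hnd : d.keys.Nodup := PySem.Dict.nodup_keys_ofList sensors
  have hinner : ∀ (r : Nat) (acc : List (List String)),
      (PySem.List.combinations d.keys r).foldl (fun acc comb =>
        if pvIsElemA zones d comb then acc ++ [comb] else acc) acc
        = acc ++ (PySem.List.combinations d.keys r).filter (fun comb => pvIsElemA zones d comb) := by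
    intro r acc
    rw [PySem.List.foldl_append_if (fun comb => pvIsElemA zones d comb) (fun comb => comb)]
    simp
  simp only [hinner]
  rw [PySem.List.foldl_append_eq_flatMap
    (fun i => (PySem.List.combinations d.keys (i + 1)).filter (fun comb => pvIsElemA zones d comb))]
  rw [List.nil_append]
  apply List.flatMap_congr
  intro r _
  apply List.filter_congr
  intro comb hcomb
  obtain ⟨hcnd, hcsub⟩ := pv_comb_facts hcomb hnd
  exact pv_pred_eq zones d _ comb hcnd
    (fun s hs => pv_cover_getD d (hcsub s hs) hnd)
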